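-- pv_equiv track=rewrite | github.com/himayla/rushhour | code/classes/model.py | get_possible_cars
-- ===== SOURCE A (Python) =====
-- def get_possible_cars(directions):
--     """
--     Returns a list with cars that can move to the empty spot.
--     """
--     valid_cars = []
--
--     # if a car is above the empty spot
--     upper = directions[0]
--     if upper:
--         last_place = len(upper) - 1
--         upper_car = upper[last_place]
--         count_upper = 0
--         for car in upper:
--             if car == upper_car:
--                 count_upper += 1
--             else:
--                 count_upper = 0
--
--             if count_upper > 1 and upper_car not in valid_cars:
--                 valid_cars.append(upper_car)
--
--     # if a car is below the empty spot
--     lower = directions[1]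
--     if lower:
--         car_lower = lower[0]
--         count_lower = 0
--         for car in lower:
--             if car == car_lower:
--                 count_lower += 1
--             else:
--                 count_lower = 0
--
--             if count_lower > 1 and car_lower not in valid_cars:
--                 valid_cars.append(car_lower)
--
--     # if a car is to the left of the empty spot
--     left = directions[2]
--     if left:
--         last_place = len(left) - 1
--         left_car = left[last_place]
--         count_left = 0
--         for car in left:
--             if car == left_car:
--                 count_left += 1
--             else:
--                 count_left = 0
--
--             if count_left > 1 and left_car not in valid_cars:
--                 valid_cars.append(left_car)
--
--     # if a car is to the right of the empty spot
--     right = directions[3]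
--     if right:
--         right_car = right[0]
--         count_right = 0
--         for car in right:
--             if car == right_car:
--                 count_right += 1
--             else:
--                 count_right = 0
--
--             if count_right > 1 and right_car not in valid_cars:
--                 valid_cars.append(right_car)
--
--     return valid_cars
-- ===== SOURCE B (Python) =====
-- def _runs(lst):
--     """Run-length encode lst into [[value, count], ...] of consecutive runs."""
--     runs = []
--     for x in lst:
--         if runs and runs[-1][0] == x:
--             runs[-1][1] += 1
--         else:
--             runs.append([x, 1])
--     return runs
--
--
-- def get_possible_cars(directions):
--     """
--     Returns a list with cars that can move to the empty spot.
--     """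
--     candidates = []
--     for i in range(4):
--         runs = _runs(directions[i])
--         if runs:
--             car = (runs[-1] if i % 2 == 0 else runs[0])[0]
--             if any(k == car and n >= 2 for k, n in runs):
--                 candidates.append(car)
--     return list(dict.fromkeys(candidates))
-- ===== Notes on version B (the rewrite author's own statement) =====
-- stated objective: alternative
-- what changed: B first run-length-encodes each lane into (value, count) runs, reads the boundary car off the first/last run and tests for a run of it of length >= 2, collecting candidates that are deduplicated at the end with dict.fromkeys, instead of A's four copy-pasted running-counter scans with interleaved membership-checked appends.
import Mathlib
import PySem

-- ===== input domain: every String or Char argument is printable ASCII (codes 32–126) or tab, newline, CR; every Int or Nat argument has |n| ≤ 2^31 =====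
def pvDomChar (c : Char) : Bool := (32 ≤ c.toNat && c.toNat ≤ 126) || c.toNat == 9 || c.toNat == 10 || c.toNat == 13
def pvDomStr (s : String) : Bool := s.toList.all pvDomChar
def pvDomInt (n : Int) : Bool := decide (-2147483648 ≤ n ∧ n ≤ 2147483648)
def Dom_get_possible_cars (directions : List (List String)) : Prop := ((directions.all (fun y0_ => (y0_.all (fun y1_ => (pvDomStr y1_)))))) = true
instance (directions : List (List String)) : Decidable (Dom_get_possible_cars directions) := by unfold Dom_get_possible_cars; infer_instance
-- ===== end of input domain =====

-- B run-length-encodes each lane, reads the boundary car off the first/last run and checks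
-- for a run of it of length >= 2, deduplicating the collected candidates at the end (alternative).

-- ===== PORT A =====
-- A's per-direction loop body: counter of the current run of `car`, append once count > 1.
def pvScanStep (car : String) (st : Int × List String) (c : String) : Int × List String :=
  let cnt := if c == car then st.1 + 1 else (0 : Int)
  let v := if cnt > 1 && !(st.2.contains car) then st.2 ++ [car] else st.2
  (cnt, v)

def get_possible_cars (directions : List (List String)) : List String :=
  -- directions[0]..directions[3]; Pre_ guarantees the four indexings succeed
  match directions with
  | upper :: lower :: left :: right :: _ =>
    let v1 := if upper.isEmpty then ([] : List String) else
      (upper.foldl (pvScanStep (upper.getLastD "")) (0, ([] : List String))).2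
    let v2 := if lower.isEmpty then v1 else
      (lower.foldl (pvScanStep (lower.headD "")) (0, v1)).2
    let v3 := if left.isEmpty then v2 else
      (left.foldl (pvScanStep (left.getLastD "")) (0, v2)).2
    if right.isEmpty then v3 else
      (right.foldl (pvScanStep (right.headD "")) (0, v3)).2
  | _ => []

-- ===== PORT B =====
-- _runs: run-length encoding; runs[-1][1] += 1 is ported as dropLast ++ [(k, n+1)]
def pvRunsStep (runs : List (String × Int)) (x : String) : List (String × Int) :=
  match runs.getLast? with
  | some (k, n) => if k == x then runs.dropLast ++ [(k, n + 1)] else runs ++ [(x, 1)]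
  | none => [(x, 1)]

def pvRuns (lst : List String) : List (String × Int) := lst.foldl pvRunsStep []

-- directions[i]; Pre_ guarantees the indexing succeeds (the default is never used then)
def pvDir (directions : List (List String)) (i : Int) : List String :=
  (PySem.List.pyGet? directions i).getD []

-- the body of B's `for i in range(4)` loop
def pvLane (directions : List (List String)) (cand : List String) (i : Int) : List String :=
  let runs := pvRuns (pvDir directions i)
  if runs.isEmpty then cand
  else
    let car := (if i % 2 == 0 then runs.getLastD ("", 0) else runs.headD ("", 0)).1
    if runs.any (fun p => p.1 == car && p.2 ≥ 2) then cand ++ [car] else cand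

def get_possible_cars_alt (directions : List (List String)) : List String :=
  let candidates := (PySem.List.pyRange 0 4 1).foldl (pvLane directions) []
  -- list(dict.fromkeys(candidates)): first-occurrence order-preserving dedup
  candidates.foldl (fun acc c => if acc.contains c then acc else acc ++ [c]) []

-- ===== PRECONDITION & SPEC =====
-- Pre_ excludes only the inputs on which A raises IndexError (fewer than four direction lists).
def Pre_get_possible_cars (directions : List (List String)) : Prop := 4 ≤ directions.length
instance (directions : List (List String)) : Decidable (Pre_get_possible_cars directions) := by unfold Pre_get_possible_cars; infer_instance
def pvWitness_get_possible_cars : List (List String) := [["A", "A"], ["B"], [], ["C", "C", "C"]]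
def Spec_get_possible_cars (directions : List (List String)) (out : List String) : Prop := out = get_possible_cars_alt directions
instance (directions : List (List String)) (out : List String) : Decidable (Spec_get_possible_cars directions out) := by unfold Spec_get_possible_cars; infer_instance

-- ===== CLAIM (what is proved, stated in full; the proofs are below) =====
def Claim_equal_get_possible_cars : Prop := ∀ (directions : List (List String)), Dom_get_possible_cars directions → Pre_get_possible_cars directions → Spec_get_possible_cars directions (get_possible_cars directions)

-- ===== LEMMAS AND PROOFS =====

-- abbreviations used only in the proofs
def pvHasPair (lst : List String) (car : String) : Bool :=
  (lst.zip lst.tail).any (fun p => p.1 == car && p.2 == car)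

def pvHasBig (runs : List (String × Int)) (car : String) : Bool :=
  runs.any (fun p => p.1 == car && p.2 ≥ 2)

-- the one-lane contribution to B's candidate list
def pvContrib (lst : List String) (takeLast : Bool) : List String :=
  if lst.isEmpty then []
  else
    let car := if takeLast then lst.getLastD "" else lst.headD ""
    if pvHasPair lst car then [car] else []

def pvDedupStep (acc : List String) (c : String) : List String :=
  if acc.contains c then acc else acc ++ [c]

lemma hasPair_cons (a : String) (rest : List String) (car : String) :
    pvHasPair (a :: rest) car = (((a == car) && (rest.head? == some car)) || pvHasPair rest car) := by
  cases rest with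
  | nil => simp [pvHasPair]
  | cons b rs => simp [pvHasPair]

-- ---- A-side characterisation (running counter = adjacent equal pair) ----
lemma scan_go (car : String) (lst : List String) : ∀ (cnt : Int) (valid : List String), 0 ≤ cnt →
    (lst.foldl (pvScanStep car) (cnt, valid)).2 =
      if ((decide (1 ≤ cnt) && (lst.head? == some car)) || pvHasPair lst car) && !(valid.contains car)
      then valid ++ [car] else valid := by
  induction lst with
  | nil => intro cnt valid _; simp [pvHasPair]
  | cons a rest ih =>
    intro cnt valid h
    rw [List.foldl_cons]
    cases hac : (a == car) with
    | true =>
      have hae : a = car := eq_of_beq hac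
      by_cases h1 : (1 : Int) ≤ cnt
      · cases hv : valid.contains car with
        | false =>
          have hv' : car ∉ valid := by simpa using hv
          rw [show pvScanStep car (cnt, valid) a = (cnt + 1, valid ++ [car]) from by
                simp [pvScanStep, hac, hv', show cnt + 1 > 1 by omega],
              ih (cnt + 1) (valid ++ [car]) (by omega)]
          simp [hv', hae, h1]
        | true =>
          have hv' : car ∈ valid := by simpa using hv
          rw [show pvScanStep car (cnt, valid) a = (cnt + 1, valid) from by
                simp [pvScanStep, hac, hv'],
              ih (cnt + 1) valid (by omega)]
          simp [hv']
      · rw [show pvScanStep car (cnt, valid) a = (cnt + 1, valid) from by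
              simp [pvScanStep, hac, show ¬(cnt + 1 > 1) by omega],
            ih (cnt + 1) valid (by omega)]
        simp [hasPair_cons, hae, show (1:Int) ≤ cnt + 1 by omega, h1]
    | false =>
      rw [show pvScanStep car (cnt, valid) a = (0, valid) from by
            simp [pvScanStep, hac, show ¬((0:Int) > 1) by norm_num],
          ih 0 valid le_rfl]
      simp [hasPair_cons, hac, show ¬((1:Int) ≤ 0) by norm_num]

-- A's lane block = fold pvDedupStep over the contribution (last-element boundary car)
lemma blockLast (lst v : List String) :
    (if lst.isEmpty then v else
      (lst.foldl (pvScanStep (lst.getLastD "")) (0, v)).2) =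
    (pvContrib lst true).foldl pvDedupStep v := by
  unfold pvContrib
  by_cases h : lst.isEmpty
  · simp [h]
  · simp only [h, Bool.false_eq_true, if_false, if_true]
    rw [scan_go _ _ 0 v (le_refl 0)]
    by_cases hc : (lst.getLastD "") ∈ v <;>
      cases hb : pvHasPair lst (lst.getLastD "") <;> simp [pvDedupStep, hb, hc]

lemma blockHead (lst v : List String) :
    (if lst.isEmpty then v else
      (lst.foldl (pvScanStep (lst.headD "")) (0, v)).2) =
    (pvContrib lst false).foldl pvDedupStep v := by
  unfold pvContrib
  by_cases h : lst.isEmpty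
  · simp [h]
  · simp only [h, Bool.false_eq_true, if_false, if_true]
    rw [scan_go _ _ 0 v (le_refl 0)]
    by_cases hc : (lst.headD "") ∈ v <;>
      cases hb : pvHasPair lst (lst.headD "") <;> simp [pvDedupStep, hb, hc]

-- ---- B-side characterisation of the run-length encoding ----
lemma runsStep_ne_nil (runs : List (String × Int)) (x : String) : pvRunsStep runs x ≠ [] := by
  unfold pvRunsStep
  match h : runs.getLast? with
  | some (k, n) => simp [h]; split <;> simp
  | none => simp [h]

lemma runs_foldl_ne_nil (lst : List String) (runs : List (String × Int)) (h : runs ≠ []) :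
    lst.foldl pvRunsStep runs ≠ [] := by
  induction lst generalizing runs with
  | nil => exact h
  | cons x rest ih => exact ih _ (runsStep_ne_nil runs x)

lemma runs_nil_iff (lst : List String) : pvRuns lst = [] ↔ lst = [] := by
  cases lst with
  | nil => simp [pvRuns]
  | cons x rest =>
    simp only [pvRuns, List.foldl_cons]
    constructor
    · intro h; exact absurd h (runs_foldl_ne_nil rest _ (runsStep_ne_nil [] x))
    · intro h; exact absurd h (by simp)

lemma runsStep_last (runs : List (String × Int)) (x : String) :
    (pvRunsStep runs x).getLast?.map Prod.fst = some x := by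
  unfold pvRunsStep
  match h : runs.getLast? with
  | some (k, n) =>
    simp only [h]
    by_cases hk : (k == x) = true
    · have : k = x := eq_of_beq hk
      simp [hk, this]
    · simp [hk]
  | none => simp [h]

lemma runs_last (lst : List String) : ∀ (runs : List (String × Int)), lst ≠ [] →
    (lst.foldl pvRunsStep runs).getLast?.map Prod.fst = lst.getLast? := by
  induction lst with
  | nil => intro _ h; exact absurd rfl h
  | cons x rest ih =>
    intro runs _
    cases hr : rest with
    | nil => simpa using runsStep_last runs x
    | cons y ys =>
      rw [hr] at ih
      rw [List.foldl_cons, ih _ (by simp)]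
      simp

lemma runsStep_head (runs : List (String × Int)) (x : String) (h : runs ≠ []) :
    (pvRunsStep runs x).head?.map Prod.fst = runs.head?.map Prod.fst := by
  unfold pvRunsStep
  match hl : runs.getLast? with
  | none => exact absurd (List.getLast?_eq_none_iff.mp hl) h
  | some (k, n) =>
    simp only [hl]
    by_cases hk : (k == x) = true
    · simp only [hk, if_true]
      cases runs with
      | nil => exact absurd rfl h
      | cons r rs =>
        cases rs with
        | nil =>
          have : r = (k, n) := by simpa using hl
          simp [this]
        | cons s ss => simp [List.dropLast_cons_of_ne_nil]
    · simp only [hk, if_false]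
      cases runs with
      | nil => exact absurd rfl h
      | cons r rs => simp

lemma runs_head (lst : List String) : ∀ (runs : List (String × Int)), runs ≠ [] →
    (lst.foldl pvRunsStep runs).head?.map Prod.fst = runs.head?.map Prod.fst := by
  induction lst with
  | nil => intro runs _; rfl
  | cons x rest ih =>
    intro runs h
    rw [List.foldl_cons, ih _ (runsStep_ne_nil runs x), runsStep_head runs x h]

lemma runsStep_pos (runs : List (String × Int)) (x : String)
    (h : ∀ p ∈ runs, 1 ≤ p.2) : ∀ p ∈ pvRunsStep runs x, 1 ≤ p.2 := by
  unfold pvRunsStep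
  match hl : runs.getLast? with
  | none => simp [hl]
  | some (k, n) =>
    have hruns : runs.dropLast ++ [(k, n)] = runs :=
      List.dropLast_append_getLast? _ (by simp [hl])
    have hn : 1 ≤ n := h (k, n) (by rw [← hruns]; simp)
    simp only [hl]
    split
    · intro p hp
      rcases List.mem_append.mp hp with h1 | h2
      · exact h p (List.dropLast_subset _ h1)
      · simp at h2; subst h2; simp; omega
    · intro p hp
      rcases List.mem_append.mp hp with h1 | h2
      · exact h p h1
      · simp at h2; subst h2; simp

lemma runsStep_hasBig (runs : List (String × Int)) (x car : String)
    (h : ∀ p ∈ runs, 1 ≤ p.2) :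
    pvHasBig (pvRunsStep runs x) car =
      (pvHasBig runs car || (runs.getLast?.map Prod.fst == some car && (x == car))) := by
  unfold pvRunsStep pvHasBig
  match hl : runs.getLast? with
  | none =>
    have : runs = [] := List.getLast?_eq_none_iff.mp hl
    subst this
    simp
  | some (k, n) =>
    have hruns : runs.dropLast ++ [(k, n)] = runs :=
      List.dropLast_append_getLast? _ (by simp [hl])
    have hn : 1 ≤ n := h (k, n) (by rw [← hruns]; simp)
    simp only [hl]
    by_cases hk : (k == x) = true
    · have hkx : k = x := eq_of_beq hk
      subst hkx
      rw [if_pos hk]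
      conv_rhs => rw [← hruns]
      simp only [List.any_append, List.any_cons, List.any_nil, Option.map_some]
      have h1 : (decide (n + 1 ≥ 2)) = true := by simp; omega
      rw [h1]
      cases hkc : (k == car) <;> simp [hkc]
    · rw [if_neg hk]
      have hterm : ((some k == some car) && (x == car)) = false := by
        by_cases hc : (k == car) = true
        · cases hx : (x == car) with
          | false => simp [hx]
          | true => exact absurd (by rw [eq_of_beq hc, eq_of_beq hx]; simp) hk
        · simp [show (k == car) = false by simpa using hc]
      simp only [List.any_append, List.any_cons, List.any_nil, Option.map_some, hterm]
      simp

lemma runs_hasBig (lst : List String) : ∀ (runs : List (String × Int)) (car : String),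
    (∀ p ∈ runs, 1 ≤ p.2) →
    pvHasBig (lst.foldl pvRunsStep runs) car =
      (pvHasBig runs car ||
       (runs.getLast?.map Prod.fst == some car && (lst.head? == some car)) ||
       pvHasPair lst car) := by
  induction lst with
  | nil => intro runs car _; simp [pvHasPair]
  | cons x rest ih =>
    intro runs car h
    rw [List.foldl_cons, ih _ car (runsStep_pos runs x h), runsStep_hasBig runs x car h,
        runsStep_last, hasPair_cons]
    simp only [List.head?_cons]
    cases pvHasBig runs car <;>
      cases hg : (runs.getLast?.map Prod.fst == some car) <;>
      by_cases hx : x = car <;>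
      cases hh : (rest.head? == some car) <;> cases pvHasPair rest car <;>
      simp [hx]

-- the core of B's lane body, with the boundary end generalised
lemma lane_core (lst : List String) (takeLast : Bool) (cand : List String) :
    (if (pvRuns lst).isEmpty then cand
     else
       if (pvRuns lst).any (fun p =>
            p.1 == (if takeLast then (pvRuns lst).getLastD ("", 0) else (pvRuns lst).headD ("", 0)).1
            && p.2 ≥ 2)
       then cand ++ [(if takeLast then (pvRuns lst).getLastD ("", 0) else (pvRuns lst).headD ("", 0)).1]
       else cand) =
    cand ++ pvContrib lst takeLast := by
  by_cases hne : lst = []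
  · subst hne; simp [pvRuns, pvContrib]
  · have hrne : pvRuns lst ≠ [] := fun hh => hne ((runs_nil_iff lst).mp hh)
    have hbig : ∀ car : String, pvHasBig (pvRuns lst) car = pvHasPair lst car := by
      intro car
      have h0 := runs_hasBig lst [] car (by intro p hp; simp at hp)
      simpa [pvRuns, pvHasBig] using h0
    have hlastk : (pvRuns lst).getLast?.map Prod.fst = lst.getLast? := runs_last lst [] hne
    have hheadk : (pvRuns lst).head?.map Prod.fst = lst.head? := by
      cases lst with
      | nil => exact absurd rfl hne
      | cons b bs =>
        simp only [pvRuns, List.foldl_cons]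
        rw [runs_head bs _ (runsStep_ne_nil [] b)]
        simp [pvRunsStep]
    have hcar : (if takeLast then (pvRuns lst).getLastD ("", 0) else (pvRuns lst).headD ("", 0)).1
        = (if takeLast then lst.getLastD "" else lst.headD "") := by
      cases takeLast with
      | true =>
        simp only [if_true]
        cases hg : (pvRuns lst).getLast? with
        | none => exact absurd (List.getLast?_eq_none_iff.mp hg) hrne
        | some p =>
          have h1 : some p.1 = lst.getLast? := by rw [← hlastk, hg]; rfl
          rw [List.getLastD_eq_getLast?, hg, List.getLastD_eq_getLast?, ← h1]
          rfl
      | false =>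
        simp only [Bool.false_eq_true, if_false]
        cases hg : (pvRuns lst).head? with
        | none => exact absurd (List.head?_eq_none_iff.mp hg) hrne
        | some p =>
          have h1 : some p.1 = lst.head? := by rw [← hheadk, hg]; rfl
          rw [List.headD_eq_head?_getD, hg, List.headD_eq_head?_getD, ← h1]
          rfl
    rw [if_neg (by simpa [List.isEmpty_iff] using hrne), hcar]
    unfold pvContrib
    simp only [show lst.isEmpty = false by simpa [List.isEmpty_iff] using hne,
      Bool.false_eq_true, if_false]
    have hb := hbig (if takeLast then lst.getLastD "" else lst.headD "")
    unfold pvHasBig at hb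
    rw [hb]
    by_cases hp : pvHasPair lst (if takeLast = true then lst.getLastD "" else lst.headD "") = true
    · rw [if_pos hp, if_pos hp]
    · rw [if_neg hp, if_neg hp, List.append_nil]

lemma pvLane_eq (directions : List (List String)) (cand : List String) (i : Int) :
    pvLane directions cand i = cand ++ pvContrib (pvDir directions i) (i % 2 == 0) := by
  simp only [pvLane]
  exact lane_core _ _ _

-- fold of the dedup step distributes over append
lemma dedup_foldl_append (xs ys acc : List String) :
    (xs ++ ys).foldl pvDedupStep acc = ys.foldl pvDedupStep (xs.foldl pvDedupStep acc) :=
  List.foldl_append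

-- ===== VERDICT (by name: the statement is the Claim_ definition above) =====
theorem get_possible_cars_spec : Claim_equal_get_possible_cars := by
  intro directions _ hpre
  unfold Spec_get_possible_cars
  match directions with
  | [] => simp [Pre_get_possible_cars] at hpre
  | [_] => simp [Pre_get_possible_cars] at hpre
  | [_, _] => simp [Pre_get_possible_cars] at hpre
  | [_, _, _] => simp [Pre_get_possible_cars] at hpre
  | u :: l :: lf :: r :: ds =>
    have d0 : pvDir (u :: l :: lf :: r :: ds) 0 = u := by
      simp [pvDir, PySem.List.pyGet?, PySem.List.pyIdx?]; rw [if_pos (by omega)]; simp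
    have d1 : pvDir (u :: l :: lf :: r :: ds) 1 = l := by
      simp [pvDir, PySem.List.pyGet?, PySem.List.pyIdx?]; rw [if_pos (by omega)]; simp
    have d2 : pvDir (u :: l :: lf :: r :: ds) 2 = lf := by
      simp [pvDir, PySem.List.pyGet?, PySem.List.pyIdx?]; rw [if_pos (by omega)]; simp
    have d3 : pvDir (u :: l :: lf :: r :: ds) 3 = r := by
      simp [pvDir, PySem.List.pyGet?, PySem.List.pyIdx?]; rw [if_pos (by omega)]; simp
    have hrange : PySem.List.pyRange 0 4 1 = [(0 : Int), 1, 2, 3] := by decide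
    have hd : (fun acc c => if acc.contains c then acc else acc ++ [c]) = pvDedupStep := rfl
    simp only [get_possible_cars, get_possible_cars_alt, hrange, List.foldl_cons, List.foldl_nil,
      hd, pvLane_eq, d0, d1, d2, d3]
    rw [show ((0:Int) % 2 == 0) = true by decide, show ((1:Int) % 2 == 0) = false by decide,
        show ((2:Int) % 2 == 0) = true by decide, show ((3:Int) % 2 == 0) = false by decide,
        blockHead r, blockLast lf, blockHead l, blockLast u,
        List.nil_append, dedup_foldl_append, dedup_foldl_append, dedup_foldl_append]
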